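-- pv_equiv track=rewrite | github.com/silverchan08/R-E | deleting_the_cromwell.py | VerticalOne
-- ===== SOURCE A (Python) =====
-- def get_bit(num, bit_pos):
--     """
--     정수에서 특정 위치의 비트 값을 가져옵니다.
--     bit_pos는 가장 오른쪽 비트(Least Significant Bit)부터 0으로 시작하는 인덱스입니다.
--     """
--     return (num >> bit_pos) & 1
--
-- def VerticalOne(cromwell):
--     """
--     비트마스킹된 정수 리스트(행)로 주어진 격자 다이어그램에서
--     연속된 수직 1 패턴을 확인합니다.
--
--     다음 조건을 만족하는 경우 True를 반환합니다:
--     1. 인접한 두 행(i와 i+1)의 같은 열(j)에 모두 비트 1이 있습니다.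
--     2. 해당 두 행(i와 i+1)이 각각 '세 개의 비트 1을 포함하는 행'이 아닙니다.
--     이 외의 경우에는 False를 반환합니다.
--
--     Args:
--         cromwell (list of int): 각 정수가 격자 다이어그램의 한 행을 나타내며,
--                                 정수의 각 비트가 해당 칸에 꼭짓점(1)이 있는지 없는지(0)를 의미합니다.
--
--     Returns:
--         bool: 조건을 만족하는 수직 1 패턴이 발견되면 True, 그렇지 않으면 False.
--     """
--     n_rows = len(cromwell) # 행의 개수
--
--     # 열의 개수를 결정합니다. 모든 정수의 최대 비트 길이를 기준으로 합니다.
--     # 만약 모든 정수가 0이라면 최소 1열로 간주합니다.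
--     n_cols = 0
--     if cromwell:
--         n_cols = max(num.bit_length() for num in cromwell) if any(cromwell) else 1
--
--
--     # 1. 세 개의 비트 1을 포함하는 행들의 인덱스를 찾습니다.
--     # (원본 코드의 'sum(cromwell.matrix[row_i]) == 3'에 해당)
--     three_ones_rows_indices = []
--     for row_i in range(n_rows):
--         # 각 행(정수)의 비트를 세는 효율적인 방법: bin(num).count('1')
--         if bin(cromwell[row_i]).count('1') == 3:
--             three_ones_rows_indices.append(row_i)
--
--
--     # 2. 연속된 수직 1 패턴을 확인합니다.
--     for i in range(n_rows - 1): # i는 0부터 n_rows - 2까지 (i+1에 접근하기 위함)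
--         for j in range(n_cols): # j는 0부터 n_cols - 1까지 (각 열 확인)
--             # 현재 행(i)과 다음 행(i+1)의 j번째 비트가 모두 1인지 확인
--             is_vertical_one = (get_bit(cromwell[i], j) == 1 and
--                                get_bit(cromwell[i + 1], j) == 1)
--
--             # 해당 두 행이 '세 개의 1을 포함하는 행'이 아닌지 확인
--             rows_not_in_three_ones = (i not in three_ones_rows_indices and
--                                       (i + 1) not in three_ones_rows_indices)
--
--             if is_vertical_one and rows_not_in_three_ones:
--                 return True
--
--     return False
-- ===== SOURCE B (Python) =====
-- def VerticalOne(cromwell):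
--     # One masked bitwise AND per adjacent row pair; popcounts are only taken
--     # for rows of a pair that actually shares a set column bit.
--     if not cromwell:
--         return False
--     n_cols = max(r.bit_length() for r in cromwell) if any(cromwell) else 1
--     mask = (1 << n_cols) - 1
--     it = iter(cromwell)
--     prev = next(it)
--     for cur in it:
--         if prev & cur & mask and bin(prev).count('1') != 3 and bin(cur).count('1') != 3:
--             return True
--         prev = cur
--     return False
-- ===== Notes on version B (the rewrite author's own statement) =====
-- stated objective: faster
-- what changed: Replaces A's per-column inner scan over every adjacent row pair plus membership tests in a list of three-bit row indices by one masked bitwise AND per adjacent pair, with the popcount flag precomputed once per row.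
import Mathlib
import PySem

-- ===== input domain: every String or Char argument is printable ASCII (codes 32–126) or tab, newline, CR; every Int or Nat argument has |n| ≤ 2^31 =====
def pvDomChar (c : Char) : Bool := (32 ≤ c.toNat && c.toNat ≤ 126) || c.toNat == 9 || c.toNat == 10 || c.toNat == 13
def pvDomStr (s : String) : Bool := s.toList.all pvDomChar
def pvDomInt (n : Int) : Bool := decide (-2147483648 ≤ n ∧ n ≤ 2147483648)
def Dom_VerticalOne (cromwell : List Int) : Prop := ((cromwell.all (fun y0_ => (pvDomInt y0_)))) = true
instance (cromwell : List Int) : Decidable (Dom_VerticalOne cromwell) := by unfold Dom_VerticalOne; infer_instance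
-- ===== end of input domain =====

-- B replaces A's per-column inner scan over every adjacent row pair by ONE masked
-- bitwise AND per pair (popcounts precomputed once per row): objective 'faster'.

-- ===== PORT A =====
-- get_bit(num, bit_pos) = (num >> bit_pos) & 1  (Python-exact: Int >>> Nat floors, PySem.Int.band is Python's &)
def pyGetBit (num : Int) (bitPos : Nat) : Int :=
  PySem.Int.band (num >>> bitPos) 1

def VerticalOne (cromwell : List Int) : Bool :=
  let nRows := cromwell.length
  -- n_cols = max(num.bit_length() for num in cromwell) if any(cromwell) else 1  (0 if empty);
  -- the max of the nonempty list of Nats is its foldl max 0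
  let nCols : Nat :=
    if cromwell.isEmpty then 0
    else if cromwell.any (fun num => num != 0) then
      (cromwell.map (fun num => PySem.Int.bitLength num)).foldl max 0
    else 1
  -- bin(x).count('1') = popcount of |x| = PySem.Int.bitCount (Python-exact, also for negatives)
  let threeOnesRowsIndices : List Nat :=
    (List.range nRows).filter (fun rowI => PySem.Int.bitCount (cromwell.getD rowI 0) == 3)
  (List.range (nRows - 1)).any (fun i =>
    (List.range nCols).any (fun j =>
      (pyGetBit (cromwell.getD i 0) j == 1 && pyGetBit (cromwell.getD (i + 1) 0) j == 1)
      && (!(threeOnesRowsIndices.contains i) && !(threeOnesRowsIndices.contains (i + 1)))))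

-- ===== PORT B =====
-- the loop body's condition: a & b & mask != 0 and popcount(a) != 3 and popcount(b) != 3
def pairHit (mask a b : Int) : Bool :=
  PySem.Int.band (PySem.Int.band a b) mask != 0 &&
    (PySem.Int.bitCount a != 3 && PySem.Int.bitCount b != 3)

-- Source B's pairwise iterator loop (prev, cur), with early return as ||
def altLoop (mask : Int) : Int → List Int → Bool
  | _, [] => false
  | prev, cur :: rest => pairHit mask prev cur || altLoop mask cur rest

def VerticalOne_alt (cromwell : List Int) : Bool :=
  match cromwell with
  | [] => false
  | first :: rest =>
    let nCols : Nat :=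
      if (first :: rest).any (fun r => r != 0) then
        ((first :: rest).map (fun r => PySem.Int.bitLength r)).foldl max 0
      else 1
    let mask : Int := (1 <<< nCols) - 1
    altLoop mask first rest

-- ===== PRECONDITION & SPEC =====
def Spec_VerticalOne (cromwell : List Int) (out : Bool) : Prop := out = VerticalOne_alt cromwell
instance (cromwell : List Int) (out : Bool) : Decidable (Spec_VerticalOne cromwell out) := by unfold Spec_VerticalOne; infer_instance

-- ===== CLAIM (what is proved, stated in full; the proofs are below) =====
def Claim_equal_VerticalOne : Prop := ∀ (cromwell : List Int), Dom_VerticalOne cromwell → Spec_VerticalOne cromwell (VerticalOne cromwell)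

-- ===== LEMMAS AND PROOFS =====

theorem natAndMod2 (m n : Nat) : (m &&& n) % 2 = 1 ↔ (m % 2 = 1 ∧ n % 2 = 1) := by
  have h := Nat.testBit_and m n 0
  simp only [Nat.testBit_zero] at h
  have h' : decide ((m &&& n) % 2 = 1) = true ↔
      (decide (m % 2 = 1) && decide (n % 2 = 1)) = true := by rw [h]
  simpa using h'

theorem natOrMod2 (m n : Nat) : (m ||| n) % 2 = 1 ↔ (m % 2 = 1 ∨ n % 2 = 1) := by
  have h := Nat.testBit_or m n 0
  simp only [Nat.testBit_zero] at h
  have h' : decide ((m ||| n) % 2 = 1) = true ↔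
      (decide (m % 2 = 1) || decide (n % 2 = 1)) = true := by rw [h]
  simpa using h'

theorem natAndDiv2 (m n : Nat) : (m &&& n) / 2 = (m / 2) &&& (n / 2) := by
  have h := Nat.shiftRight_and_distrib (a := m) (b := n) (i := 1)
  simp only [Nat.shiftRight_one] at h
  exact h

theorem natOrDiv2 (m n : Nat) : (m ||| n) / 2 = (m / 2) ||| (n / 2) := by
  have h := Nat.shiftRight_or_distrib (a := m) (b := n) (i := 1)
  simp only [Nat.shiftRight_one] at h
  exact h

-- parity of a Python bitwise AND
theorem bandMod2 (a b : Int) :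
    PySem.Int.mod (PySem.Int.band a b) 2 = 1 ↔
      (PySem.Int.mod a 2 = 1 ∧ PySem.Int.mod b 2 = 1) := by
  simp only [PySem.Int.mod_eq_emod_of_pos (show (0:Int) < 2 by norm_num)]
  unfold PySem.Int.band
  by_cases ha : 0 ≤ a <;> by_cases hb : 0 ≤ b <;>
    simp only [ha, hb, if_pos, if_neg, not_false_iff]
  · have h := natAndMod2 a.toNat b.toNat
    generalize hk : a.toNat &&& b.toNat = k at h ⊢
    omega
  · have h := natAndMod2 a.toNat (-b - 1).toNat
    have hle : a.toNat &&& (-b - 1).toNat ≤ a.toNat := Nat.and_le_left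
    generalize hk : a.toNat &&& (-b - 1).toNat = k at h hle ⊢
    omega
  · have h := natAndMod2 b.toNat (-a - 1).toNat
    have hle : b.toNat &&& (-a - 1).toNat ≤ b.toNat := Nat.and_le_left
    generalize hk : b.toNat &&& (-a - 1).toNat = k at h hle ⊢
    omega
  · have h := natOrMod2 (-a - 1).toNat (-b - 1).toNat
    generalize hk : (-a - 1).toNat ||| (-b - 1).toNat = k at h ⊢
    omega

-- halving a Python bitwise AND
theorem bandDiv2 (a b : Int) :
    PySem.Int.floordiv (PySem.Int.band a b) 2 =
      PySem.Int.band (PySem.Int.floordiv a 2) (PySem.Int.floordiv b 2) := by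
  simp only [PySem.Int.floordiv_eq_ediv_of_pos (show (0:Int) < 2 by norm_num)]
  unfold PySem.Int.band
  by_cases ha : 0 ≤ a <;> by_cases hb : 0 ≤ b
  · have ha2 : 0 ≤ a / 2 := by omega
    have hb2 : 0 ≤ b / 2 := by omega
    simp only [ha, hb, ha2, hb2, if_pos]
    have h1 := natAndDiv2 a.toNat b.toNat
    have ht1 : (a / 2).toNat = a.toNat / 2 := by omega
    have ht2 : (b / 2).toNat = b.toNat / 2 := by omega
    rw [ht1, ht2, ← h1]
    generalize a.toNat &&& b.toNat = k
    omega
  · have ha2 : 0 ≤ a / 2 := by omega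
    have hb2 : ¬ (0 ≤ b / 2) := by omega
    simp only [ha, hb, ha2, hb2, if_pos, if_neg, not_false_iff]
    have ht1 : (a / 2).toNat = a.toNat / 2 := by omega
    have ht3 : (-(b / 2) - 1).toNat = (-b - 1).toNat / 2 := by omega
    rw [ht1, ht3]
    have h1 := natAndDiv2 a.toNat (-b - 1).toNat
    have h2 := natAndMod2 a.toNat (-b - 1).toNat
    have hle : a.toNat &&& (-b - 1).toNat ≤ a.toNat := Nat.and_le_left
    generalize hk : a.toNat &&& (-b - 1).toNat = k at h1 h2 hle
    rw [← h1]
    omega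
  · have ha2 : ¬ (0 ≤ a / 2) := by omega
    have hb2 : 0 ≤ b / 2 := by omega
    simp only [ha, hb, ha2, hb2, if_pos, if_neg, not_false_iff]
    have ht1 : (b / 2).toNat = b.toNat / 2 := by omega
    have ht3 : (-(a / 2) - 1).toNat = (-a - 1).toNat / 2 := by omega
    rw [ht1, ht3]
    have h1 := natAndDiv2 b.toNat (-a - 1).toNat
    have h2 := natAndMod2 b.toNat (-a - 1).toNat
    have hle : b.toNat &&& (-a - 1).toNat ≤ b.toNat := Nat.and_le_left
    generalize hk : b.toNat &&& (-a - 1).toNat = k at h1 h2 hle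
    rw [← h1]
    omega
  · have ha2 : ¬ (0 ≤ a / 2) := by omega
    have hb2 : ¬ (0 ≤ b / 2) := by omega
    simp only [ha, hb, ha2, hb2, if_neg, not_false_iff]
    have ht1 : (-(a / 2) - 1).toNat = (-a - 1).toNat / 2 := by omega
    have ht2 : (-(b / 2) - 1).toNat = (-b - 1).toNat / 2 := by omega
    rw [ht1, ht2]
    have h1 := natOrDiv2 (-a - 1).toNat (-b - 1).toNat
    rw [← h1]
    generalize (-a - 1).toNat ||| (-b - 1).toNat = k
    omega

theorem shiftZero (a : Int) : a >>> (0 : Nat) = a := by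
  simp [Int.shiftRight_eq_div_pow]

theorem shiftSucc (a : Int) (j : Nat) :
    a >>> (j + 1) = (PySem.Int.floordiv a 2) >>> j := by
  rw [Int.shiftRight_eq_div_pow, Int.shiftRight_eq_div_pow,
    PySem.Int.floordiv_eq_ediv_of_pos (show (0:Int) < 2 by norm_num)]
  push_cast
  rw [pow_succ', ← Int.ediv_ediv_of_nonneg (show (0:Int) ≤ 2 by norm_num)]

-- masked AND over two rows is zero iff no common set bit below n
theorem bandMaskZero (n : Nat) : ∀ (a b : Int),
    (PySem.Int.band (PySem.Int.band a b) ((2 : Int) ^ n - 1) = 0) ↔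
      ∀ j, j < n → ¬(PySem.Int.mod (a >>> j) 2 = 1 ∧ PySem.Int.mod (b >>> j) 2 = 1) := by
  induction n with
  | zero => intro a b; simp [PySem.Int.band_zero]
  | succ n ih =>
    intro a b
    have hpow : (0:Int) < 2 ^ n := by positivity
    have hmask1 : PySem.Int.mod ((2:Int) ^ (n+1) - 1) 2 = 1 := by
      rw [PySem.Int.mod_eq_emod_of_pos (show (0:Int) < 2 by norm_num), pow_succ']
      omega
    have hmaskd : PySem.Int.floordiv ((2:Int) ^ (n+1) - 1) 2 = (2:Int) ^ n - 1 := by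
      rw [PySem.Int.floordiv_eq_ediv_of_pos (show (0:Int) < 2 by norm_num), pow_succ']
      omega
    have hXnn : 0 ≤ PySem.Int.band (PySem.Int.band a b) ((2:Int) ^ (n+1) - 1) := by
      rw [PySem.Int.band_comm]
      have hp1 : (0:Int) < 2 ^ (n+1) := by positivity
      exact PySem.Int.band_nonneg_of_nonneg_left _ (by omega)
    have hsplit : PySem.Int.band (PySem.Int.band a b) ((2:Int) ^ (n+1) - 1) = 0 ↔
        (¬ PySem.Int.mod (PySem.Int.band (PySem.Int.band a b) ((2:Int) ^ (n+1) - 1)) 2 = 1 ∧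
         PySem.Int.floordiv (PySem.Int.band (PySem.Int.band a b) ((2:Int) ^ (n+1) - 1)) 2 = 0) := by
      generalize hx : PySem.Int.band (PySem.Int.band a b) ((2:Int) ^ (n+1) - 1) = x at hXnn ⊢
      rw [PySem.Int.mod_eq_emod_of_pos (show (0:Int) < 2 by norm_num),
        PySem.Int.floordiv_eq_ediv_of_pos (show (0:Int) < 2 by norm_num)]
      omega
    rw [hsplit, bandMod2, bandMod2, hmask1, bandDiv2, bandDiv2, hmaskd, ih]
    constructor
    · rintro ⟨h0, hs⟩ j hj
      match j with
      | 0 =>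
        rw [shiftZero, shiftZero]
        exact fun hab => h0 ⟨hab, rfl⟩
      | (j + 1) =>
        rw [shiftSucc a, shiftSucc b]
        exact hs j (by omega)
    · intro h
      constructor
      · have h0 := h 0 (by omega)
        rw [shiftZero, shiftZero] at h0
        rintro ⟨⟨ma, mb⟩, -⟩
        exact h0 ⟨ma, mb⟩
      · intro j hj
        have hj2 := h (j + 1) (by omega)
        rw [shiftSucc a, shiftSucc b] at hj2
        exact hj2

-- A's inner column loop equals B's masked AND test
theorem innerAny (a b : Int) (n : Nat) :
    ((List.range n).any fun j => pyGetBit a j == 1 && pyGetBit b j == 1)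
      = (PySem.Int.band (PySem.Int.band a b) ((1 : Int) <<< n - 1) != 0) := by
  have h1 : ((1:Int) <<< n) = 2 ^ n := by rw [Int.shiftLeft_eq]; ring
  rw [h1, Bool.eq_iff_iff]
  simp only [List.any_eq_true, List.mem_range, Bool.and_eq_true, beq_iff_eq,
    bne_iff_ne, ne_eq, pyGetBit, PySem.Int.band_one]
  constructor
  · rintro ⟨j, hj, hpa, hpb⟩ h0
    exact ((bandMaskZero n a b).mp h0) j hj ⟨hpa, hpb⟩
  · intro h
    by_contra hno
    simp only [not_exists, not_and] at hno
    exact h ((bandMaskZero n a b).mpr (fun j hj hp => (hno j hj hp.1) hp.2))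

theorem any_and_const (n : Nat) (p : Nat → Bool) (c : Bool) :
    ((List.range n).any fun j => p j && c) = ((List.range n).any p && c) := by
  cases c <;> simp

theorem any_range_congr (n : Nat) (p q : Nat → Bool) (h : ∀ i, i < n → p i = q i) :
    (List.range n).any p = (List.range n).any q := by
  rw [Bool.eq_iff_iff]
  simp only [List.any_eq_true, List.mem_range]
  constructor
  · rintro ⟨i, hi, hp⟩; exact ⟨i, hi, (h i hi) ▸ hp⟩
  · rintro ⟨i, hi, hq⟩; exact ⟨i, hi, (h i hi) ▸ hq⟩

theorem range_succ_any_head (n : Nat) (f : Nat → Bool) :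
    (List.range (n + 1)).any f = (f 0 || (List.range n).any (fun i => f (i + 1))) := by
  rw [List.range_succ_eq_map]
  simp [Function.comp_def]

theorem contains_filter_range (N i : Nat) (p : Nat → Bool) (h : i < N) :
    (((List.range N).filter p).contains i) = p i := by
  rw [Bool.eq_iff_iff]
  simp [List.mem_filter, List.mem_range, h]

-- B's pairwise loop, read off against positions of the original list
theorem altLoopRange (mask : Int) : ∀ (first : Int) (rest : List Int),
    altLoop mask first rest =
      (List.range ((first :: rest).length - 1)).any (fun i =>
        pairHit mask ((first :: rest).getD i 0) ((first :: rest).getD (i + 1) 0)) := by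
  intro first rest
  induction rest generalizing first with
  | nil => simp [altLoop]
  | cons cur rest ih =>
    simp only [altLoop, List.length_cons, Nat.add_sub_cancel]
    rw [range_succ_any_head]
    simp only [List.getD_cons_zero, List.getD_cons_succ]
    rw [ih cur]
    simp

-- ===== VERDICT (by name: the statement is the Claim_ definition above) =====
theorem VerticalOne_spec : Claim_equal_VerticalOne := by
  intro cromwell _
  unfold Spec_VerticalOne VerticalOne VerticalOne_alt
  cases cromwell with
  | nil => rfl
  | cons first rest =>
    simp only [List.isEmpty_cons, Bool.false_eq_true, if_false]
    rw [altLoopRange]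
    apply any_range_congr
    intro i hi
    simp only [List.length_cons, Nat.add_sub_cancel] at hi
    have hi1 : i < (first :: rest).length := by simp; omega
    have hi2 : i + 1 < (first :: rest).length := by simp; omega
    rw [any_and_const, innerAny, contains_filter_range _ _ _ hi1, contains_filter_range _ _ _ hi2]
    simp [pairHit, bne, Bool.and_comm]
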